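-- pv_equiv track=rewrite | github.com/cob0013/CourseWork | COMP5790/Assignments/Assignment-2/assignment2.py | document_counts
-- ===== SOURCE A (Python) =====
-- def document_counts(doc):
--     counts = {}
--     for line in doc:
--         seen_this_line = set()
--         for word in line.split():
--             if word not in counts:
--                 counts[word] = 0
--             if word not in seen_this_line:
--                 counts[word] += 1
--                 seen_this_line.add(word)
--     return counts
-- ===== SOURCE B (Python) =====
-- def document_counts(doc):
--     # Inverted index: for each word, the set of line numbers it occurs on;
--     # the answer is the size of each set.
--     lines_of = {}
--     for i, line in enumerate(doc):
--         for word in line.split():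
--             lines_of.setdefault(word, set()).add(i)
--     return {word: len(s) for word, s in lines_of.items()}
-- ===== Notes on version B (the rewrite author's own statement) =====
-- stated objective: alternative
-- what changed: Instead of maintaining running integer counters guarded by a per-line seen-set, B builds an inverted index mapping each word to the set of line numbers it occurs on, and derives the counts in a second pass as the sizes of those sets.
import Mathlib
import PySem

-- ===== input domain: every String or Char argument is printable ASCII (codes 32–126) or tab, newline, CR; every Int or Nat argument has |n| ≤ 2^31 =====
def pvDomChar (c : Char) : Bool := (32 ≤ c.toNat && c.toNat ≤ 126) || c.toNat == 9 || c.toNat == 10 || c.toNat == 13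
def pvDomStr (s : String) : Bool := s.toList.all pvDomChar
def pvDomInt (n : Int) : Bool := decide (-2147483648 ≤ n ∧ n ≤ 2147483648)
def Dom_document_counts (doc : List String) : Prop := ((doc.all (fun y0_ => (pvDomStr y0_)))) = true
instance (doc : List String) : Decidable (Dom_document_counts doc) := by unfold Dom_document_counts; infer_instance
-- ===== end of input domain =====

-- B replaces A's running counters + per-line seen-set with an inverted index (word → set of
-- line numbers) whose set sizes are the counts; same cost, a different data structure.

-- ===== PORT A =====
def document_counts (doc : List String) : List (String × Int) :=
  (doc.foldl
    (fun counts line =>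
      ((PySem.Str.split₀ line).foldl
        (fun (st : PySem.Dict String Int × PySem.Set String) word =>
          let counts := if st.1.contains word then st.1 else st.1.insert word 0
          if st.2.contains word then (counts, st.2)
          else (counts.modify word 0 (· + 1), st.2.add word))
        (counts, PySem.Set.empty)).1)
    PySem.Dict.empty).items

-- ===== PORT B =====
def document_counts_alt (doc : List String) : List (String × Int) :=
  let lines_of : PySem.Dict String (PySem.Set Int) :=
    (PySem.List.enumerate doc).foldl
      (fun d p =>
        (PySem.Str.split₀ p.2).foldl
          (fun (d : PySem.Dict String (PySem.Set Int)) word =>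
            d.insert word (PySem.Set.add (d.getD word PySem.Set.empty) p.1))
          d)
      PySem.Dict.empty
  lines_of.items.map (fun p => (p.1, PySem.Set.len p.2))

-- ===== PRECONDITION & SPEC =====
def Spec_document_counts (doc : List String) (out : List (String × Int)) : Prop := out = document_counts_alt doc
instance (doc : List String) (out : List (String × Int)) : Decidable (Spec_document_counts doc out) := by unfold Spec_document_counts; infer_instance

-- ===== CLAIM (what is proved, stated in full; the proofs are below) =====
def Claim_equal_document_counts : Prop := ∀ (doc : List String), Dom_document_counts doc → Spec_document_counts doc (document_counts doc)

-- ===== LEMMAS AND PROOFS =====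

-- named forms of the loop step functions (definitionally the ports' lambdas)
def dcStepA (st : PySem.Dict String Int × PySem.Set String) (word : String) :
    PySem.Dict String Int × PySem.Set String :=
  let counts := if st.1.contains word then st.1 else st.1.insert word 0
  if st.2.contains word then (counts, st.2)
  else (counts.modify word 0 (· + 1), st.2.add word)

def dcTally (c : PySem.Dict String Int) (w : String) : PySem.Dict String Int :=
  c.insert w (c.getD w 0 + 1)

def dcStepB (i : Int) (d : PySem.Dict String (PySem.Set Int)) (w : String) :
    PySem.Dict String (PySem.Set Int) :=
  d.insert w (PySem.Set.add (d.getD w PySem.Set.empty) i)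

-- A's "ensure key then bump" equals a single insert-with-get tally step.
lemma dc_step_eq (c : PySem.Dict String Int) (w : String) :
    (if c.contains w then c else c.insert w 0).modify w 0 (· + 1) = dcTally c w := by
  by_cases h : c.contains w = true
  · simp [h, PySem.Dict.modify, dcTally]
  · simp only [Bool.not_eq_true] at h
    have hn : c.get? w = none := (PySem.Dict.get?_eq_none_iff_contains c w).mpr h
    rw [if_neg (by simp [h])]
    simp [PySem.Dict.modify, PySem.Dict.getD, hn,
      PySem.Dict.insert_insert_self, dcTally]

lemma dc_prefix_update (s : PySem.Set String) (ws : List String) :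
    s <+: PySem.Set.update s ws := by
  induction ws generalizing s with
  | nil => simp [PySem.Set.update]
  | cons w ws ih =>
    have h1 : s <+: PySem.Set.add s w := by
      rw [PySem.Set.add_eq_ite]
      split_ifs <;> simp
    exact h1.trans (ih (PySem.Set.add s w))

-- A's inner loop over a line, started at (c, s), equals the tally fold over the
-- words of the line that are new relative to s, in first-occurrence order.
lemma dc_inner_eq (ws : List String) (c : PySem.Dict String Int) (s : PySem.Set String)
    (h : ∀ w ∈ s, c.contains w = true) :
    (ws.foldl dcStepA (c, s)).1
      = ((PySem.Set.update s ws).drop s.length).foldl dcTally c := by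
  induction ws generalizing c s with
  | nil => simp [PySem.Set.update]
  | cons w ws ih =>
    rw [List.foldl_cons]
    by_cases hw : w ∈ s
    · have hcs : PySem.Set.contains s w = true := (PySem.Set.contains_iff s w).mpr hw
      have hstA : dcStepA (c, s) w = (c, s) := by
        simp [dcStepA, hw, h w hw]
      have hupd : PySem.Set.update s (w :: ws) = PySem.Set.update s ws := by
        simp [PySem.Set.update, PySem.Set.add_of_mem hw]
      rw [hstA, hupd]
      exact ih c s h
    · have hcs : PySem.Set.contains s w = false := by
        rcases Bool.eq_false_or_eq_true (PySem.Set.contains s w) with h' | h'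
        · exact absurd ((PySem.Set.contains_iff s w).mp h') hw
        · exact h'
      have hadd : PySem.Set.add s w = s ++ [w] := PySem.Set.add_of_not_mem hw
      have hstA : dcStepA (c, s) w = (dcTally c w, PySem.Set.add s w) := by
        simp only [dcStepA, hcs, Bool.false_eq_true, if_false]
        rw [dc_step_eq]
      have h' : ∀ v ∈ PySem.Set.add s w, (dcTally c w).contains v = true := by
        intro v hv
        rw [hadd] at hv
        rcases List.mem_append.mp hv with hv | hv
        · rw [dcTally, PySem.Dict.contains_insert, h v hv]; simp
        · simp only [List.mem_singleton] at hv
          rw [hv, dcTally]; exact PySem.Dict.contains_insert_self c w _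
      have hupd : PySem.Set.update s (w :: ws) = PySem.Set.update (PySem.Set.add s w) ws := by
        simp [PySem.Set.update]
      obtain ⟨t, ht⟩ := dc_prefix_update (PySem.Set.add s w) ws
      rw [hstA, ih (dcTally c w) (PySem.Set.add s w) h', hupd, ← ht, List.drop_left,
          hadd, List.append_assoc, List.drop_left, List.singleton_append, List.foldl_cons]

-- A's per-line loop equals the tally fold over the line's deduplicated words.
lemma dc_line_eq (counts : PySem.Dict String Int) (line : String) :
    ((PySem.Str.split₀ line).foldl dcStepA (counts, PySem.Set.empty)).1
      = (PySem.List.dedup (PySem.Str.split₀ line)).foldl dcTally counts := by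
  rw [dc_inner_eq _ _ PySem.Set.empty (by intro w hw; simp [PySem.Set.empty] at hw)]
  simp [PySem.Set.empty, PySem.List.dedup_eq_ofList, PySem.Set.ofList, PySem.Set.update]

-- B's inner loop: getD after a line, as a function of membership of the word in the line.
lemma dcB_inner_getD (l : List String) (d : PySem.Dict String (PySem.Set Int)) (i : Int)
    (w : String) :
    ((l.foldl (dcStepB i) d).getD w PySem.Set.empty)
      = if w ∈ l then PySem.Set.add (d.getD w PySem.Set.empty) i
        else d.getD w PySem.Set.empty := by
  induction l generalizing d with
  | nil => simp
  | cons w' l ih =>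
    rw [List.foldl_cons, ih]
    by_cases h : w' = w
    · subst h
      have hg : (dcStepB i d w').getD w' PySem.Set.empty
          = PySem.Set.add (d.getD w' PySem.Set.empty) i := by
        simp [dcStepB, PySem.Dict.getD_insert_self]
      rw [hg]
      have : PySem.Set.add (PySem.Set.add (d.getD w' PySem.Set.empty) i) i
          = PySem.Set.add (d.getD w' PySem.Set.empty) i :=
        PySem.Set.add_of_mem (by rw [PySem.Set.mem_add]; right; rfl)
      simp
    · have h2 : ¬ w = w' := fun hh => h hh.symm
      have hg : (dcStepB i d w').getD w PySem.Set.empty = d.getD w PySem.Set.empty := by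
        rw [dcStepB, PySem.Dict.getD_insert, if_neg h2]
      rw [hg]
      simp [List.mem_cons, h2]

lemma update_dedup (s : PySem.Set String) (xs : List String) :
    PySem.Set.update s (PySem.List.dedup xs) = PySem.Set.update s xs := by
  rw [PySem.Set.update_eq_append_filter, PySem.Set.update_eq_append_filter]
  simp [PySem.List.dedup_eq_ofList, PySem.Set.ofList_ofList]

lemma dc_main (doc : List String) (i0 : Int) (cA : PySem.Dict String Int)
    (dB : PySem.Dict String (PySem.Set Int))
    (hk : cA.keys = dB.keys)
    (hv : ∀ w, cA.getD w 0 = ((dB.getD w PySem.Set.empty).length : Int))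
    (hb : ∀ w j, j ∈ dB.getD w PySem.Set.empty → j < i0) :
    (doc.foldl (fun c line => (PySem.List.dedup (PySem.Str.split₀ line)).foldl dcTally c) cA).keys
      = ((PySem.List.enumerate doc i0).foldl
          (fun d p => (PySem.Str.split₀ p.2).foldl (dcStepB p.1) d) dB).keys
    ∧ (∀ w, (doc.foldl (fun c line => (PySem.List.dedup (PySem.Str.split₀ line)).foldl dcTally c) cA).getD w 0
        = ((((PySem.List.enumerate doc i0).foldl
            (fun d p => (PySem.Str.split₀ p.2).foldl (dcStepB p.1) d) dB).getD w PySem.Set.empty).length : Int)) := by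
  induction doc generalizing i0 cA dB with
  | nil => exact ⟨hk, hv⟩
  | cons line rest ih =>
    rw [PySem.List.enumerate_cons, List.foldl_cons, List.foldl_cons]
    set ws := PySem.Str.split₀ line with hws
    set cA' := (PySem.List.dedup ws).foldl dcTally cA with hcA'
    set dB' := ws.foldl (dcStepB i0) dB with hdB'
    have hk' : cA'.keys = dB'.keys := by
      rw [hcA', hdB']
      rw [show dcTally = (fun (c : PySem.Dict String Int) w => c.insert w (c.getD w 0 + 1)) from rfl]
      rw [show dcStepB i0 = (fun (d : PySem.Dict String (PySem.Set Int)) w => d.insert w (PySem.Set.add (d.getD w PySem.Set.empty) i0)) from rfl]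
      rw [PySem.Dict.keys_foldl_insert, PySem.Dict.keys_foldl_insert, update_dedup, hk]
    have hv' : ∀ w, cA'.getD w 0 = ((dB'.getD w PySem.Set.empty).length : Int) := by
      intro w
      rw [hcA', hdB']
      rw [show dcTally = (fun (c : PySem.Dict String Int) w => c.insert w (c.getD w 0 + 1)) from rfl]
      rw [PySem.Dict.getD_foldl_insert_add_one, dcB_inner_getD]
      by_cases hm : w ∈ ws
      · have hmd : w ∈ PySem.List.dedup ws := by
          rw [PySem.List.mem_dedup]; exact hm
        have hcount : (PySem.List.dedup ws).count w = 1 :=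
          List.count_eq_one_of_mem (PySem.List.nodup_dedup ws) hmd
        have hni : i0 ∉ dB.getD w PySem.Set.empty := fun hin => absurd (hb w i0 hin) (lt_irrefl i0)
        rw [if_pos hm, hcount, PySem.Set.add_of_not_mem hni, List.length_append, hv w]
        simp only [List.length_singleton]; push_cast; ring
      · have hcount : (PySem.List.dedup ws).count w = 0 :=
          List.count_eq_zero_of_not_mem (by rw [PySem.List.mem_dedup]; exact hm)
        rw [if_neg hm, hcount, hv w]; ring
    have hb' : ∀ w j, j ∈ dB'.getD w PySem.Set.empty → j < i0 + 1 := by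
      intro w j hj
      rw [hdB', dcB_inner_getD] at hj
      by_cases hm : w ∈ ws
      · rw [if_pos hm, PySem.Set.mem_add] at hj
        rcases hj with hj | rfl
        · exact lt_trans (hb w j hj) (by omega)
        · omega
      · rw [if_neg hm] at hj
        exact lt_trans (hb w j hj) (by omega)
    exact ih (i0 + 1) cA' dB' hk' hv' hb'

lemma dcB_nodup_keys (doc : List String) (i0 : Int) (dB : PySem.Dict String (PySem.Set Int))
    (h : dB.keys.Nodup) :
    ((PySem.List.enumerate doc i0).foldl
        (fun d p => (PySem.Str.split₀ p.2).foldl (dcStepB p.1) d) dB).keys.Nodup := by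
  induction doc generalizing i0 dB with
  | nil => exact h
  | cons line rest ih =>
    rw [PySem.List.enumerate_cons, List.foldl_cons]
    exact ih (i0 + 1) _ (by
      rw [show dcStepB i0 = (fun (d : PySem.Dict String (PySem.Set Int)) w => d.insert w (PySem.Set.add (d.getD w PySem.Set.empty) i0)) from rfl]
      exact PySem.Dict.nodup_keys_foldl_insert _ _ _ h)

lemma dc_eq (doc : List String) : document_counts doc = document_counts_alt doc := by
  have hfunA : (fun (counts : PySem.Dict String Int) (line : String) =>
      ((PySem.Str.split₀ line).foldl dcStepA (counts, PySem.Set.empty)).1)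
      = (fun counts line =>
      ((PySem.Str.split₀ line).foldl
        (fun (st : PySem.Dict String Int × PySem.Set String) word =>
          let counts := if st.1.contains word then st.1 else st.1.insert word 0
          if st.2.contains word then (counts, st.2)
          else (counts.modify word 0 (· + 1), st.2.add word))
        (counts, PySem.Set.empty)).1) := rfl
  have hA : document_counts doc
      = (doc.foldl (fun c line => (PySem.List.dedup (PySem.Str.split₀ line)).foldl dcTally c) PySem.Dict.empty).items := by
    unfold document_counts
    rw [← hfunA]
    congr 1
    induction doc using List.reverseRecOn with
    | nil => rfl
    | append_singleton xs x ih =>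
        rw [List.foldl_append, List.foldl_append, ih]
        simp only [List.foldl_cons, List.foldl_nil, dc_line_eq]
  have hB : document_counts_alt doc
      = ((PySem.List.enumerate doc 0).foldl
          (fun d p => (PySem.Str.split₀ p.2).foldl (dcStepB p.1) d) PySem.Dict.empty).items.map
          (fun p => (p.1, (p.2.length : Int))) := rfl
  obtain ⟨hk, hv⟩ := dc_main doc 0 PySem.Dict.empty PySem.Dict.empty rfl
    (fun w => by simp [PySem.Dict.getD_empty, PySem.Set.empty])
    (fun w j hj => by simp [PySem.Dict.getD_empty, PySem.Set.empty] at hj)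
  set rA := doc.foldl (fun c line => (PySem.List.dedup (PySem.Str.split₀ line)).foldl dcTally c) PySem.Dict.empty with hrA
  set rB := (PySem.List.enumerate doc 0).foldl
      (fun d p => (PySem.Str.split₀ p.2).foldl (dcStepB p.1) d) PySem.Dict.empty with hrB
  have hndB : rB.keys.Nodup := dcB_nodup_keys doc 0 PySem.Dict.empty (by simp)
  have hndA : rA.keys.Nodup := hk ▸ hndB
  rw [hA, hB,
    PySem.Dict.items_eq_map_keys rA hndA 0,
    PySem.Dict.items_eq_map_keys rB hndB PySem.Set.empty,
    List.map_map, hk]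
  apply List.map_congr_left
  intro k _
  simp only [Function.comp]
  rw [hv k]

-- ===== VERDICT (by name: the statement is the Claim_ definition above) =====
theorem document_counts_spec : Claim_equal_document_counts := by
  intro doc _
  exact dc_eq doc
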